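-- pv_equiv track=rewrite | github.com/damxin/MemOS | src/memos/mem_ingest/chunker.py | _count_braces
-- ===== SOURCE A (Python) =====
-- def _count_braces(line: str) -> int:
--     """Count braces in line"""
--     d = 0
--     for ch in line:
--         if ch in '{(':
--             d += 1
--         elif ch in '})':
--             d -= 1
--     return d
-- ===== SOURCE B (Python) =====
-- def _count_braces(line: str) -> int:
--     """Count braces in line"""
--     return line.count('{') + line.count('(') - line.count('}') - line.count(')')
-- ===== Notes on version B (the rewrite author's own statement) =====
-- stated objective: idiomatic
-- what changed: Replaced the branching accumulator loop by a closed-form arithmetic combination of four str.count library scans, with no explicit loop or branches.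
import Mathlib
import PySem

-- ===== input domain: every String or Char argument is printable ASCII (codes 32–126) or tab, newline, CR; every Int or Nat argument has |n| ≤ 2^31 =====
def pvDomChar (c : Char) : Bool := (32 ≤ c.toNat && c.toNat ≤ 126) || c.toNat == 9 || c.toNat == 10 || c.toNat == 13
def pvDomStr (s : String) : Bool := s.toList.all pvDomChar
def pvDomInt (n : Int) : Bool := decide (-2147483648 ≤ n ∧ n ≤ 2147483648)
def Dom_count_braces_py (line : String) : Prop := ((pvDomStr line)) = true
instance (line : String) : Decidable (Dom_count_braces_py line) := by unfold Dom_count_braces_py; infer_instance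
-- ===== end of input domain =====

-- B replaces A's single branching accumulator loop by four library count scans combined arithmetically (idiomatic; measured faster by constant factor: library scans instead of a per-character Python loop).

-- ===== PORT A =====
-- one pass, a counter mutated in branches (literal port of A's for-loop)
def count_braces_py (line : String) : Int :=
  line.toList.foldl (fun d ch =>
    if ch ∈ ['{', '('] then d + 1
    else if ch ∈ ['}', ')'] then d - 1
    else d) 0

-- ===== PORT B =====
-- four str.count scans combined by a closed-form expression (literal port of Source B)
def count_braces_py_alt (line : String) : Int :=
  (PySem.Str.count line "{" : Int) + (PySem.Str.count line "(" : Int)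
    - (PySem.Str.count line "}" : Int) - (PySem.Str.count line ")" : Int)

-- ===== PRECONDITION & SPEC =====
def Spec_count_braces_py (line : String) (out : Int) : Prop := out = count_braces_py_alt line
instance (line : String) (out : Int) : Decidable (Spec_count_braces_py line out) := by unfold Spec_count_braces_py; infer_instance

-- ===== CLAIM (what is proved, stated in full; the proofs are below) =====
def Claim_equal_count_braces_py : Prop := ∀ (line : String), Dom_count_braces_py line → Spec_count_braces_py line (count_braces_py line)

-- ===== LEMMAS AND PROOFS =====

theorem go_singleton (c : Char) (l : List Char) : ∀ (fuel acc : Nat), l.length ≤ fuel →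
    PySem.Chars.count.go [c] fuel l acc = acc + l.count c := by
  induction l with
  | nil => intro fuel acc h; cases fuel <;> simp [PySem.Chars.count.go]
  | cons h t ih =>
    intro fuel acc hle
    cases fuel with
    | zero => simp at hle
    | succ n =>
      simp only [PySem.Chars.count.go, List.isPrefixOf, List.count_cons, List.length_cons] at *
      by_cases hc : c = h
      · subst hc
        simp only [BEq.rfl, Bool.true_and, if_pos, show ([] : List Char).length + 1 = 1 from rfl,
          List.drop_one, List.tail_cons]
        rw [ih n (acc+1) (by omega)]
        omega
      · have : (c == h) = false := by simp [hc]
        simp only [this, Bool.false_and, Bool.false_eq_true, if_false]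
        rw [ih n acc (by omega)]
        simp [Ne.symm hc]

theorem count_singleton (s : List Char) (c : Char) :
    PySem.Chars.count s [c] = s.count c := by
  simp [PySem.Chars.count, go_singleton c s s.length 0 le_rfl]

theorem foldl_braces (l : List Char) (a : Int) :
    l.foldl (fun d ch =>
      if ch ∈ ['{', '('] then d + 1
      else if ch ∈ ['}', ')'] then d - 1
      else d) a
    = a + l.count '{' + l.count '(' - l.count '}' - l.count ')' := by
  induction l generalizing a with
  | nil => simp
  | cons h t ih =>
    simp only [List.foldl_cons, List.count_cons, ih]
    by_cases h1 : h = '{' <;> by_cases h2 : h = '(' <;> by_cases h3 : h = '}' <;>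
      by_cases h4 : h = ')' <;>
      simp_all [List.mem_cons] <;> ring

-- ===== VERDICT (by name: the statement is the Claim_ definition above) =====
theorem count_braces_py_spec : Claim_equal_count_braces_py := by
  intro line _
  unfold Spec_count_braces_py count_braces_py count_braces_py_alt
  rw [foldl_braces]
  simp only [PySem.Str.count_eq]
  rw [show ("{" : String).toList = ['{'] from rfl, show ("(" : String).toList = ['('] from rfl,
      show ("}" : String).toList = ['}'] from rfl, show (")" : String).toList = [')'] from rfl]
  simp [count_singleton]
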